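-- pv_equiv track=rewrite | github.com/hoseong0422/BaekJoon | 프로그래머스/1/42840. 모의고사/모의고사.py | solution
-- ===== SOURCE A (Python) =====
-- def solution(answers):
--     supo_1 = [1, 2, 3, 4, 5]
--     supo_2 = [2, 1, 2, 3, 2, 4, 2, 5]
--     supo_3 = [3, 3, 1, 1, 2, 2, 4, 4, 5, 5]
--
--     answer_dict = {
--         "answer_a" : 0,
--         "answer_b" : 0,
--         "answer_c" : 0
--         }
--
--     for i in range(len(answers)):
--
--         if i >= len(supo_1):
--             if answers[i] == supo_1[i % (len(supo_1))]:
--                 answer_dict['answer_a'] += 1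
--         else:
--             if supo_1[i] == answers[i]:
--                 answer_dict['answer_a'] += 1
--
--         if i >= len(supo_2):
--             if answers[i] == supo_2[i % (len(supo_2))]:
--                 answer_dict['answer_b'] += 1
--         else:
--             if supo_2[i] == answers[i]:
--                 answer_dict['answer_b'] += 1
--
--         if i >= len(supo_3):
--             if answers[i] == supo_3[i % (len(supo_3))]:
--                 answer_dict['answer_c'] += 1
--         else:
--             if supo_3[i] == answers[i]:
--                 answer_dict['answer_c'] += 1
--
--     sorted_dict = sorted(answer_dict.items(), key = lambda x : x[1], reverse=True)
--
--     answer = []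
--     for i in range(len(sorted_dict)):
--         if len(answer) == 0:
--             if sorted_dict[i][0] == "answer_a":
--                 answer.append(1)
--             elif sorted_dict[i][0] == "answer_b":
--                 answer.append(2)
--             elif sorted_dict[i][0] == "answer_c":
--                 answer.append(3)
--
--         elif sorted_dict[i][1] == sorted_dict[i-1][1]:
--             if sorted_dict[i][0] == "answer_a":
--                 answer.append(1)
--             elif sorted_dict[i][0] == "answer_b":
--                 answer.append(2)
--             elif sorted_dict[i][0] == "answer_c":
--                 answer.append(3)
--
--         elif sorted_dict[i][1] != sorted_dict[i-1][1]:
--             break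
--
--     answer.sort()
--     return answer
-- ===== SOURCE B (Python) =====
-- def solution(answers):
--     # One combined lcm-period table: zip the three patterns repeated to length 40,
--     # then a single fused pass rotating through that table (no index arithmetic, no modulo).
--     base = list(zip([1, 2, 3, 4, 5] * 8,
--                     [2, 1, 2, 3, 2, 4, 2, 5] * 5,
--                     [3, 3, 1, 1, 2, 2, 4, 4, 5, 5] * 4))
--     s1 = s2 = s3 = 0
--     rows = base
--     for a in answers:
--         g1, g2, g3 = rows[0]
--         rows = rows[1:] or base
--         s1 += a == g1
--         s2 += a == g2
--         s3 += a == g3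
--     m = max(s1, s2, s3)
--     return [k for k, s in ((1, s1), (2, s2), (3, s3)) if s == m]
-- ===== Notes on version B (the rewrite author's own statement) =====
-- stated objective: simpler
-- what changed: B builds one combined lcm-period-40 table by zipping the three patterns repeated to a common length and makes a single fused pass that rotates through that table (no per-element index/modulo arithmetic and no per-pattern pass), then takes a scalar max of the three scores; A keeps a string-keyed dict updated via i%len(pattern) branches per pattern, sorts its items by count descending and walks them with a break, re-sorting at the end.
import Mathlib
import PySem

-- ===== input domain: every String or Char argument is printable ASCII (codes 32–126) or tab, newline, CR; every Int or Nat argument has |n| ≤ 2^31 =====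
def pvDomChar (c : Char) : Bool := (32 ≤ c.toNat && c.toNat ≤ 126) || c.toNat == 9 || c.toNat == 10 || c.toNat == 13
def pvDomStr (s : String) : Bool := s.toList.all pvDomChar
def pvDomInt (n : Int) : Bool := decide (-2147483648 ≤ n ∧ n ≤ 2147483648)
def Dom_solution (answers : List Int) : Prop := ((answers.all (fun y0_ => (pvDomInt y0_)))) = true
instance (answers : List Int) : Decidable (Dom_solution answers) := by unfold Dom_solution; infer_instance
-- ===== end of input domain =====

-- B replaces A's string-keyed dict, per-index i%len comparisons and sort-by-count-then-walk-with-break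
-- selection by one combined period-40 table (the three patterns zipped to their common period) consumed
-- by a single rotating pass, plus a scalar max over the three scores (objective: simpler).

-- ===== PORT A =====
-- the if/elif append chain of A's selection loop
def pvName (n : String) : List Int :=
  if n = "answer_a" then [1] else if n = "answer_b" then [2] else if n = "answer_c" then [3] else []

-- A's second 'for i in range(len(sorted_dict))' loop with its break; fuel = sd.length makes the
-- index recursion structural (the loop runs at most sd.length iterations)
def pvSelLoop (sd : List (String × Int)) : Nat → Nat → List Int → List Int
  | 0, _, answer => answer
  | fuel+1, i, answer =>
    if i < sd.length then
      if answer.length = 0 then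
        pvSelLoop sd fuel (i+1) (answer ++ pvName (PySem.List.pyGetD sd (i:Int) ("", 0)).1)
      else if (PySem.List.pyGetD sd (i:Int) ("",0)).2 = (PySem.List.pyGetD sd ((i:Int)-1) ("",0)).2 then
        pvSelLoop sd fuel (i+1) (answer ++ pvName (PySem.List.pyGetD sd (i:Int) ("",0)).1)
      else answer
    else answer

def solution (answers : List Int) : List Int :=
  let supo_1 : List Int := [1, 2, 3, 4, 5]
  let supo_2 : List Int := [2, 1, 2, 3, 2, 4, 2, 5]
  let supo_3 : List Int := [3, 3, 1, 1, 2, 2, 4, 4, 5, 5]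
  let answer_dict : PySem.Dict String Int :=
    ((PySem.Dict.empty.insert "answer_a" 0).insert "answer_b" 0).insert "answer_c" 0
  let answer_dict :=
    (PySem.List.pyRange 0 (PySem.List.len answers) 1).foldl (fun d i =>
      let d := if i ≥ PySem.List.len supo_1 then
          (if PySem.List.pyGetD answers i 0 = PySem.List.pyGetD supo_1 (PySem.Int.mod i (PySem.List.len supo_1)) 0
           then d.modify "answer_a" 0 (· + 1) else d)
        else
          (if PySem.List.pyGetD supo_1 i 0 = PySem.List.pyGetD answers i 0
           then d.modify "answer_a" 0 (· + 1) else d)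
      let d := if i ≥ PySem.List.len supo_2 then
          (if PySem.List.pyGetD answers i 0 = PySem.List.pyGetD supo_2 (PySem.Int.mod i (PySem.List.len supo_2)) 0
           then d.modify "answer_b" 0 (· + 1) else d)
        else
          (if PySem.List.pyGetD supo_2 i 0 = PySem.List.pyGetD answers i 0
           then d.modify "answer_b" 0 (· + 1) else d)
      let d := if i ≥ PySem.List.len supo_3 then
          (if PySem.List.pyGetD answers i 0 = PySem.List.pyGetD supo_3 (PySem.Int.mod i (PySem.List.len supo_3)) 0
           then d.modify "answer_c" 0 (· + 1) else d)
        else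
          (if PySem.List.pyGetD supo_3 i 0 = PySem.List.pyGetD answers i 0
           then d.modify "answer_c" 0 (· + 1) else d)
      d) answer_dict
  let sorted_dict := PySem.List.sorted answer_dict.items (fun x => x.2) true
  let answer := pvSelLoop sorted_dict sorted_dict.length 0 []
  PySem.List.sorted answer (fun x => x) false

-- ===== PORT B =====
-- base = list(zip([1,2,3,4,5]*8, [2,1,2,3,2,4,2,5]*5, [3,3,1,1,2,2,4,4,5,5]*4))
def pvBase : List (Int × Int × Int) :=
  List.zip ((List.replicate 8 ([1,2,3,4,5] : List Int)).flatten)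
    (List.zip ((List.replicate 5 ([2,1,2,3,2,4,2,5] : List Int)).flatten)
              ((List.replicate 4 ([3,3,1,1,2,2,4,4,5,5] : List Int)).flatten))

-- the body of B's single loop: read rows[0], rotate 'rows = rows[1:] or base', bump the three scores
def pvBStep (base : List (Int × Int × Int))
    (st : List (Int × Int × Int) × Int × Int × Int) (a : Int) :
    List (Int × Int × Int) × Int × Int × Int :=
  let g := PySem.List.pyGetD st.1 0 ((0:Int), (0:Int), (0:Int))
  let rows := if st.1.tail.isEmpty then base else st.1.tail
  (rows,
   st.2.1 + (if a = g.1 then (1:Int) else 0),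
   st.2.2.1 + (if a = g.2.1 then (1:Int) else 0),
   st.2.2.2 + (if a = g.2.2 then (1:Int) else 0))

def solution_alt (answers : List Int) : List Int :=
  let base := pvBase
  let st := answers.foldl (pvBStep base) (base, (0:Int), (0:Int), (0:Int))
  let m := max st.2.1 (max st.2.2.1 st.2.2.2)
  (([((1:Int), st.2.1), (2, st.2.2.1), (3, st.2.2.2)]).filter (fun ks => ks.2 == m)).map
    (fun ks => ks.1)

-- ===== PRECONDITION & SPEC =====
def Spec_solution (answers : List Int) (out : List Int) : Prop := out = solution_alt answers
instance (answers : List Int) (out : List Int) : Decidable (Spec_solution answers out) := by unfold Spec_solution; infer_instance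

-- ===== CLAIM (what is proved, stated in full; the proofs are below) =====
def Claim_equal_solution : Prop := ∀ (answers : List Int), Dom_solution answers → Spec_solution answers (solution answers)

-- ===== LEMMAS AND PROOFS =====

-- the dict A builds, with its three fixed keys
def pvMk3 (a b c : Int) : PySem.Dict String Int :=
  PySem.Dict.mk [("answer_a",a),("answer_b",b),("answer_c",c)]

-- whether answers[i] matches pattern p at index i, exactly as A's branchy loop body tests it
def pvHit (p : List Int) (answers : List Int) (i : Int) : Bool :=
  if i ≥ PySem.List.len p
  then decide (PySem.List.pyGetD answers i 0 = PySem.List.pyGetD p (PySem.Int.mod i (PySem.List.len p)) 0)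
  else decide (PySem.List.pyGetD p i 0 = PySem.List.pyGetD answers i 0)

-- number of elements of `rest` (which sits at offset k of the full list) matching pattern p cyclically
def pvCnt (p : List Int) : Nat → List Int → Int
  | _, [] => 0
  | k, a :: t =>
      (if a = PySem.List.pyGetD p (((k % p.length : Nat)) : Int) 0 then 1 else 0) + pvCnt p (k+1) t

-- A's tail: sort the three (key, count) items by count descending, walk with break, sort ascending
def pvTailA (a b c : Int) : List Int :=
  let sd := PySem.List.sorted (pvMk3 a b c).items (fun x => x.2) true
  PySem.List.sorted (pvSelLoop sd sd.length 0 []) (fun x => x) false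

-- B's tail: 1-based positions of the maximal entries among (a, b, c)
def pvTailB (a b c : Int) : List Int :=
  let m := max a (max b c)
  (([((1:Int), a), (2, b), (3, c)]).filter (fun ks => ks.2 == m)).map (fun ks => ks.1)

lemma pvModify_a (a b c : Int) (f : Int → Int) : (pvMk3 a b c).modify "answer_a" 0 f = pvMk3 (f a) b c := rfl
lemma pvModify_b (a b c : Int) (f : Int → Int) : (pvMk3 a b c).modify "answer_b" 0 f = pvMk3 a (f b) c := rfl
lemma pvModify_c (a b c : Int) (f : Int → Int) : (pvMk3 a b c).modify "answer_c" 0 f = pvMk3 a b (f c) := rfl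

lemma pvStep_a (answers : List Int) (a b c i : Int) :
    (if i ≥ PySem.List.len [(1:Int),2,3,4,5] then
        (if PySem.List.pyGetD answers i 0 = PySem.List.pyGetD [(1:Int),2,3,4,5] (PySem.Int.mod i (PySem.List.len [(1:Int),2,3,4,5])) 0
         then (pvMk3 a b c).modify "answer_a" 0 (· + 1) else pvMk3 a b c)
      else
        (if PySem.List.pyGetD [(1:Int),2,3,4,5] i 0 = PySem.List.pyGetD answers i 0
         then (pvMk3 a b c).modify "answer_a" 0 (· + 1) else pvMk3 a b c))
    = pvMk3 (a + if pvHit [1,2,3,4,5] answers i then 1 else 0) b c := by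
  unfold pvHit; split_ifs <;> simp_all [pvModify_a]

lemma pvStep_b (answers : List Int) (a b c i : Int) :
    (if i ≥ PySem.List.len [(2:Int),1,2,3,2,4,2,5] then
        (if PySem.List.pyGetD answers i 0 = PySem.List.pyGetD [(2:Int),1,2,3,2,4,2,5] (PySem.Int.mod i (PySem.List.len [(2:Int),1,2,3,2,4,2,5])) 0
         then (pvMk3 a b c).modify "answer_b" 0 (· + 1) else pvMk3 a b c)
      else
        (if PySem.List.pyGetD [(2:Int),1,2,3,2,4,2,5] i 0 = PySem.List.pyGetD answers i 0
         then (pvMk3 a b c).modify "answer_b" 0 (· + 1) else pvMk3 a b c))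
    = pvMk3 a (b + if pvHit [2,1,2,3,2,4,2,5] answers i then 1 else 0) c := by
  unfold pvHit; split_ifs <;> simp_all [pvModify_b]

lemma pvStep_c (answers : List Int) (a b c i : Int) :
    (if i ≥ PySem.List.len [(3:Int),3,1,1,2,2,4,4,5,5] then
        (if PySem.List.pyGetD answers i 0 = PySem.List.pyGetD [(3:Int),3,1,1,2,2,4,4,5,5] (PySem.Int.mod i (PySem.List.len [(3:Int),3,1,1,2,2,4,4,5,5])) 0
         then (pvMk3 a b c).modify "answer_c" 0 (· + 1) else pvMk3 a b c)
      else
        (if PySem.List.pyGetD [(3:Int),3,1,1,2,2,4,4,5,5] i 0 = PySem.List.pyGetD answers i 0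
         then (pvMk3 a b c).modify "answer_c" 0 (· + 1) else pvMk3 a b c))
    = pvMk3 a b (c + if pvHit [3,3,1,1,2,2,4,4,5,5] answers i then 1 else 0) := by
  unfold pvHit; split_ifs <;> simp_all [pvModify_c]

-- A's whole counting loop, by induction from the three step lemmas
lemma pvFoldA (answers : List Int) (L : List Int) (a b c : Int) :
    L.foldl (fun d i =>
      let d := if i ≥ PySem.List.len [(1:Int),2,3,4,5] then
          (if PySem.List.pyGetD answers i 0 = PySem.List.pyGetD [(1:Int),2,3,4,5] (PySem.Int.mod i (PySem.List.len [(1:Int),2,3,4,5])) 0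
           then d.modify "answer_a" 0 (· + 1) else d)
        else
          (if PySem.List.pyGetD [(1:Int),2,3,4,5] i 0 = PySem.List.pyGetD answers i 0
           then d.modify "answer_a" 0 (· + 1) else d)
      let d := if i ≥ PySem.List.len [(2:Int),1,2,3,2,4,2,5] then
          (if PySem.List.pyGetD answers i 0 = PySem.List.pyGetD [(2:Int),1,2,3,2,4,2,5] (PySem.Int.mod i (PySem.List.len [(2:Int),1,2,3,2,4,2,5])) 0
           then d.modify "answer_b" 0 (· + 1) else d)
        else
          (if PySem.List.pyGetD [(2:Int),1,2,3,2,4,2,5] i 0 = PySem.List.pyGetD answers i 0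
           then d.modify "answer_b" 0 (· + 1) else d)
      let d := if i ≥ PySem.List.len [(3:Int),3,1,1,2,2,4,4,5,5] then
          (if PySem.List.pyGetD answers i 0 = PySem.List.pyGetD [(3:Int),3,1,1,2,2,4,4,5,5] (PySem.Int.mod i (PySem.List.len [(3:Int),3,1,1,2,2,4,4,5,5])) 0
           then d.modify "answer_c" 0 (· + 1) else d)
        else
          (if PySem.List.pyGetD [(3:Int),3,1,1,2,2,4,4,5,5] i 0 = PySem.List.pyGetD answers i 0
           then d.modify "answer_c" 0 (· + 1) else d)
      d) (pvMk3 a b c)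
    = pvMk3 (a + (L.countP (pvHit [1,2,3,4,5] answers) : Int))
            (b + (L.countP (pvHit [2,1,2,3,2,4,2,5] answers) : Int))
            (c + (L.countP (pvHit [3,3,1,1,2,2,4,4,5,5] answers) : Int)) := by
  induction L generalizing a b c with
  | nil => simp
  | cons x xs ih =>
    simp only [List.foldl_cons]
    rw [pvStep_a, pvStep_b, pvStep_c, ih]
    by_cases h1 : pvHit [1,2,3,4,5] answers x = true <;>
      by_cases h2 : pvHit [2,1,2,3,2,4,2,5] answers x = true <;>
      by_cases h3 : pvHit [3,3,1,1,2,2,4,4,5,5] answers x = true <;>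
      simp [pvMk3, List.countP_cons, h1, h2, h3] <;>
      (try (push_cast; ring)) <;>
      (try exact ⟨trivial, trivial, trivial⟩) <;>
      (try exact ⟨trivial, trivial⟩) <;>
      (try trivial)

lemma pvA_eq (answers : List Int) :
    solution answers
      = pvTailA (((PySem.List.pyRange 0 (PySem.List.len answers) 1).countP (pvHit [1,2,3,4,5] answers) : Nat) : Int)
                (((PySem.List.pyRange 0 (PySem.List.len answers) 1).countP (pvHit [2,1,2,3,2,4,2,5] answers) : Nat) : Int)
                (((PySem.List.pyRange 0 (PySem.List.len answers) 1).countP (pvHit [3,3,1,1,2,2,4,4,5,5] answers) : Nat) : Int) := by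
  simp only [solution]
  rw [show ((PySem.Dict.empty.insert "answer_a" (0:Int)).insert "answer_b" 0).insert "answer_c" 0 = pvMk3 0 0 0 from rfl]
  rw [pvFoldA]
  simp only [zero_add]
  rfl

-- the combined table reads off each pattern cyclically, and rotation is drop of the next residue
lemma pvBase_fact : ∀ r, r < 40 →
    (PySem.List.pyGetD (pvBase.drop r) 0 ((0:Int), (0:Int), (0:Int))
       = (PySem.List.pyGetD [1,2,3,4,5] ((r % 5 : Nat) : Int) 0,
          PySem.List.pyGetD [2,1,2,3,2,4,2,5] ((r % 8 : Nat) : Int) 0,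
          PySem.List.pyGetD [3,3,1,1,2,2,4,4,5,5] ((r % 10 : Nat) : Int) 0))
    ∧ ((if (pvBase.drop r).tail.isEmpty then pvBase else (pvBase.drop r).tail)
         = pvBase.drop ((r + 1) % 40)) := by decide

-- invariant of B's single loop: with rows = base.drop (k % 40), the fold adds the cyclic match counts
lemma pvBLoop (rest : List Int) : ∀ (k : Nat) (s1 s2 s3 : Int),
    rest.foldl (pvBStep pvBase) (pvBase.drop (k % 40), s1, s2, s3)
    = (pvBase.drop ((k + rest.length) % 40),
       s1 + pvCnt [1,2,3,4,5] k rest,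
       s2 + pvCnt [2,1,2,3,2,4,2,5] k rest,
       s3 + pvCnt [3,3,1,1,2,2,4,4,5,5] k rest) := by
  induction rest with
  | nil => intro k s1 s2 s3; simp [pvCnt]
  | cons a t ih =>
    intro k s1 s2 s3
    obtain ⟨hg, hr⟩ := pvBase_fact (k % 40) (Nat.mod_lt _ (by omega))
    simp only [List.foldl_cons, pvBStep, hg, hr]
    have h40 : (k % 40 + 1) % 40 = (k + 1) % 40 := by omega
    have h5 : k % 40 % 5 = k % 5 := Nat.mod_mod_of_dvd k (by norm_num)
    have h8 : k % 40 % 8 = k % 8 := Nat.mod_mod_of_dvd k (by norm_num)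
    have h10 : k % 40 % 10 = k % 10 := Nat.mod_mod_of_dvd k (by norm_num)
    rw [h40, h5, h8, h10, ih (k+1)]
    norm_num [pvCnt, Prod.mk.injEq]
    refine ⟨by congr 1; omega, by ring, by ring, by ring⟩

-- A's countP over range(len) equals B's running cyclic count, pattern by pattern
lemma pvCnt_eq (p : List Int) (hp : p ≠ []) :
    ∀ (rest pre : List Int),
    ((PySem.List.pyRange (pre.length : Int) (PySem.List.len (pre ++ rest)) 1).countP
        (pvHit p (pre ++ rest)) : Int)
    = pvCnt p pre.length rest := by
  intro rest
  induction rest with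
  | nil =>
    intro pre
    rw [PySem.List.pyRange_one_eq_nil (by simp)]
    simp [pvCnt]
  | cons a t ih =>
    intro pre
    have hlen : PySem.List.len (pre ++ a :: t) = (pre.length : Int) + 1 + t.length := by
      simp [PySem.List.len_eq]; push_cast; ring
    rw [PySem.List.pyRange_one_cons (by rw [hlen]; omega)]
    have hmid : pvHit p (pre ++ a :: t) (pre.length : Int)
        = decide (a = PySem.List.pyGetD p (((pre.length % p.length : Nat)) : Int) 0) := by
      have hpl : 0 < p.length := List.length_pos_of_ne_nil hp
      have hga : PySem.List.pyGetD (pre ++ a :: t) (pre.length : Int) 0 = a := by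
        rw [PySem.List.pyGetD_natCast]
        simp [List.getD, List.getElem?_append_right (Nat.le_refl pre.length)]
      unfold pvHit
      by_cases hge : (pre.length : Int) ≥ PySem.List.len p
      · rw [if_pos hge, hga]
        have : PySem.Int.mod (pre.length : Int) (PySem.List.len p)
            = ((pre.length % p.length : Nat) : Int) := by
          rw [PySem.List.len_eq]; exact_mod_cast PySem.Int.mod_natCast pre.length p.length
        rw [this]
      · rw [if_neg hge, hga]
        have hlt : pre.length < p.length := by
          simp [PySem.List.len_eq] at hge; exact_mod_cast hge
        rw [Nat.mod_eq_of_lt hlt]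
        simp [eq_comm]
    rw [List.countP_cons, hmid]
    have ih' := ih (pre ++ [a])
    rw [show (pre ++ [a]) ++ t = pre ++ a :: t by simp] at ih'
    simp only [List.length_append, List.length_cons, List.length_nil, Nat.zero_add] at ih'
    have hcast : ((pre.length : Int) + 1) = ((pre.length + 1 : Nat) : Int) := by push_cast; ring
    rw [hcast, Nat.cast_add, ih']
    simp only [pvCnt]
    by_cases hh : a = PySem.List.pyGetD p (((pre.length % p.length : Nat)) : Int) 0 <;>
      simp [hh] <;> ring

-- the two tails agree on every triple of counts
lemma pvTail_eq (a b c : Int) : pvTailA a b c = pvTailB a b c := by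
  unfold pvTailA pvTailB pvMk3
  rcases lt_trichotomy a b with h1|h1|h1 <;> rcases lt_trichotomy b c with h2|h2|h2 <;>
    rcases lt_trichotomy a c with h3|h3|h3 <;>
    (try subst h1) <;> (try subst h2) <;> (try subst h3) <;>
    (try (exfalso; omega)) <;>
    (try have n1 : a ≠ b := by omega) <;> (try have n2 : b ≠ a := by omega) <;>
    (try have n3 : b ≠ c := by omega) <;> (try have n4 : c ≠ b := by omega) <;>
    (try have n5 : a ≠ c := by omega) <;> (try have n6 : c ≠ a := by omega) <;>
    simp_all [PySem.List.sorted, PySem.List.insertBy, pvSelLoop, pvName,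
      PySem.List.pyGetD, PySem.List.pyGet?, PySem.List.pyIdx?,
      max_def, le_of_lt, not_le.mpr] <;>
    (try (split_ifs <;> try (exfalso; omega))) <;>
    (try simp_all [PySem.List.sorted, PySem.List.insertBy, pvSelLoop, pvName,
      PySem.List.pyGetD, PySem.List.pyGet?, PySem.List.pyIdx?]) <;>
    (try (split_ifs <;> try (exfalso; omega))) <;>
    (try simp_all [PySem.List.sorted, PySem.List.insertBy, pvSelLoop, pvName,
      PySem.List.pyGetD, PySem.List.pyGet?, PySem.List.pyIdx?])

lemma pvB_eq (answers : List Int) :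
    solution_alt answers
      = pvTailB (pvCnt [1,2,3,4,5] 0 answers) (pvCnt [2,1,2,3,2,4,2,5] 0 answers)
                (pvCnt [3,3,1,1,2,2,4,4,5,5] 0 answers) := by
  simp only [solution_alt]
  have hb := pvBLoop answers 0 0 0 0
  rw [show pvBase.drop (0 % 40) = pvBase from rfl] at hb
  rw [hb]
  simp [pvTailB]

-- ===== VERDICT (by name: the statement is the Claim_ definition above) =====
theorem solution_spec : Claim_equal_solution := by
  intro answers _
  unfold Spec_solution
  have c1 := pvCnt_eq [1,2,3,4,5] (by simp) answers []
  have c2 := pvCnt_eq [2,1,2,3,2,4,2,5] (by simp) answers []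
  have c3 := pvCnt_eq [3,3,1,1,2,2,4,4,5,5] (by simp) answers []
  simp only [List.nil_append, List.length_nil, Nat.cast_zero] at c1 c2 c3
  rw [pvA_eq, pvB_eq, c1, c2, c3, pvTail_eq]
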